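-- pv_equiv track=rewrite | github.com/Centrum-Edukacyjne-Go-Szaleni-Samuraje/iglo | macmahon/macmahon.py | get_bars_sizes
-- ===== SOURCE A (Python) =====
-- import math
-- from typing import List, Iterable, Optional, Iterator, Tuple
--
-- def get_bars_sizes(number_of_players: int, number_of_bars: int) -> List[int]:
--     bars_sizes = []
--     players_left = number_of_players
--     bars_left = number_of_bars
--     while bars_left:
--         bar_size = math.ceil(players_left / bars_left)
--         bars_sizes.append(bar_size)
--         players_left = players_left - bar_size
--         bars_left = bars_left - 1
--     return bars_sizes
-- ===== SOURCE B (Python) =====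
-- def get_bars_sizes(number_of_players: int, number_of_bars: int):
--     if number_of_bars == 0:
--         return []
--     q, r = divmod(number_of_players, number_of_bars)
--     return [q + 1] * r + [q] * (number_of_bars - r)
-- ===== Notes on version B (the rewrite author's own statement) =====
-- stated objective: faster
-- what changed: Closed-form divmod distribution ([q+1]*r + [q]*(k-r)) replaces the loop that recomputes a float ceil on a shrinking remainder.
import Mathlib
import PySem

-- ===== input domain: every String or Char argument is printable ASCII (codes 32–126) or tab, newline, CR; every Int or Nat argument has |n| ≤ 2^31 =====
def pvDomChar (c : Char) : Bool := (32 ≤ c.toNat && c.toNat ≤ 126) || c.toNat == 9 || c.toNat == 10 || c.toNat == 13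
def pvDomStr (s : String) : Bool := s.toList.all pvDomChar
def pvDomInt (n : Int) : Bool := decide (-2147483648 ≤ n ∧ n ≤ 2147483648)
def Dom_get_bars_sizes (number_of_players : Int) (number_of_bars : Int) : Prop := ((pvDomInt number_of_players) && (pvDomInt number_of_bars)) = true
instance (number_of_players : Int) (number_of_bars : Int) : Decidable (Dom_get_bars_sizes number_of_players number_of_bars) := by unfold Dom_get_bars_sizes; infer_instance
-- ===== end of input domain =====

-- B replaces A's shrinking-remainder loop (a float-ceil per bar) by one closed-form divmod
-- distribution [q+1]*r + [q]*(k-r); objective: simpler. Return-value equivalence only (no mutation).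

-- ===== PORT A =====
-- The while loop runs exactly number_of_bars.toNat times when 0 ≤ number_of_bars (Pre_);
-- math.ceil(players_left / bars_left) is exact integer ceil on Dom (|n| ≤ 2^31 < 2^53),
-- ported as -((-players) // bars).
def pvGoA (players : Int) (bars : Int) : Nat → List Int
  | 0 => []
  | f + 1 =>
    let bar_size := -(PySem.Int.floordiv (-players) bars)
    bar_size :: pvGoA (players - bar_size) (bars - 1) f

def get_bars_sizes (number_of_players : Int) (number_of_bars : Int) : List Int :=
  pvGoA number_of_players number_of_bars number_of_bars.toNat

-- ===== PORT B =====
-- Python list multiplication by a non-positive count yields []; .toNat clamps the same way.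
def get_bars_sizes_alt (number_of_players : Int) (number_of_bars : Int) : List Int :=
  if number_of_bars = 0 then []
  else
    let q := PySem.Int.floordiv number_of_players number_of_bars
    let r := PySem.Int.mod number_of_players number_of_bars
    List.replicate r.toNat (q + 1) ++ List.replicate (number_of_bars - r).toNat q

-- ===== PRECONDITION & SPEC =====
-- A's while loop never terminates when number_of_bars < 0 (bars_left stays truthy), so Pre_
-- admits exactly the inputs on which A returns: 0 ≤ number_of_bars.
def Pre_get_bars_sizes (number_of_players : Int) (number_of_bars : Int) : Prop :=
  0 ≤ number_of_bars
instance (number_of_players : Int) (number_of_bars : Int) : Decidable (Pre_get_bars_sizes number_of_players number_of_bars) := by unfold Pre_get_bars_sizes; infer_instance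

def pvWitness_get_bars_sizes : Int × Int := (7, 3)

def Spec_get_bars_sizes (number_of_players : Int) (number_of_bars : Int) (out : List Int) : Prop := out = get_bars_sizes_alt number_of_players number_of_bars
instance (number_of_players : Int) (number_of_bars : Int) (out : List Int) : Decidable (Spec_get_bars_sizes number_of_players number_of_bars out) := by unfold Spec_get_bars_sizes; infer_instance

-- ===== CLAIM (what is proved, stated in full; the proofs are below) =====
def Claim_equal_get_bars_sizes : Prop := ∀ (number_of_players : Int) (number_of_bars : Int), Dom_get_bars_sizes number_of_players number_of_bars → Pre_get_bars_sizes number_of_players number_of_bars → Spec_get_bars_sizes number_of_players number_of_bars (get_bars_sizes number_of_players number_of_bars)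

-- ===== LEMMAS AND PROOFS =====

-- Uniqueness of Euclidean quotient/remainder for a positive divisor.
lemma pv_ediv_emod_unique {a b q r : Int} (hb : 0 < b) (h : a = b * q + r)
    (h0 : 0 ≤ r) (h1 : r < b) : a / b = q ∧ a % b = r := by
  constructor
  · rw [h, add_comm, Int.add_mul_ediv_left _ _ (ne_of_gt hb), Int.ediv_eq_zero_of_lt h0 h1,
      zero_add]
  · rw [h, add_comm, Int.add_mul_emod_self_left, Int.emod_eq_of_lt h0 h1]

-- The closed form satisfies A's loop recurrence: for 0 < k,
-- alt n k = ceil(n/k) :: alt (n - ceil(n/k)) (k-1).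
lemma alt_step (n k : Int) (hk : 0 < k) :
    get_bars_sizes_alt n k =
      (-(PySem.Int.floordiv (-n) k)) :: get_bars_sizes_alt (n + PySem.Int.floordiv (-n) k) (k - 1) := by
  have hkne : k ≠ 0 := ne_of_gt hk
  set q := n / k with hq
  set r := n % k with hr
  have hnr : n = k * q + r := (Int.ediv_add_emod n k).symm
  have hr0 : 0 ≤ r := Int.emod_nonneg n hkne
  have hrk : r < k := Int.emod_lt_of_pos n hk
  have hfd : PySem.Int.floordiv n k = q := by
    rw [PySem.Int.floordiv_eq_ediv_of_pos hk]
  have hmd : PySem.Int.mod n k = r := by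
    rw [PySem.Int.mod_eq_emod_of_pos hk]
  by_cases hrz : r = 0
  · -- remainder zero: the head is q, the tail is k-1 copies of q
    have hneg : PySem.Int.floordiv (-n) k = -q := by
      rw [PySem.Int.floordiv_eq_ediv_of_pos hk]
      exact (pv_ediv_emod_unique (r := 0) hk (by rw [hnr, hrz]; ring) le_rfl hk).1
    by_cases hk1 : k = 1
    · subst hk1
      simp [get_bars_sizes_alt]
    · have hk1' : 0 < k - 1 := by omega
      have htail : n + -q = (k - 1) * q + 0 := by rw [hnr, hrz]; ring
      have h2 := pv_ediv_emod_unique hk1' htail le_rfl hk1'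
      simp only [get_bars_sizes_alt, hmd, hrz, hneg, hfd,
        PySem.Int.floordiv_eq_ediv_of_pos hk1', PySem.Int.mod_eq_emod_of_pos hk1',
        if_neg hkne, if_neg (by omega : ¬ k - 1 = 0), h2.1, h2.2]
      rw [show (k - 0).toNat = (k - 1 - 0).toNat + 1 by omega, List.replicate_succ]
      simp
  · -- positive remainder: the head is q+1, one fewer large bar remains
    have hr1 : 1 ≤ r := by omega
    have hneg : PySem.Int.floordiv (-n) k = -q - 1 := by
      rw [PySem.Int.floordiv_eq_ediv_of_pos hk]
      exact (pv_ediv_emod_unique (r := k - r) hk (by rw [hnr]; ring) (by omega) (by omega)).1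
    have hk1' : 0 < k - 1 := by omega
    have htail : n + (-q - 1) = (k - 1) * q + (r - 1) := by rw [hnr]; ring
    have h2 := pv_ediv_emod_unique hk1' htail (by omega) (by omega)
    simp only [get_bars_sizes_alt, hmd, hneg, hfd,
      PySem.Int.floordiv_eq_ediv_of_pos hk1', PySem.Int.mod_eq_emod_of_pos hk1',
      if_neg hkne, if_neg (by omega : ¬ k - 1 = 0), h2.1, h2.2]
    rw [show r.toNat = (r - 1).toNat + 1 by omega,
      show (k - r).toNat = (k - 1 - (r - 1)).toNat by omega,
      List.replicate_succ, List.cons_append]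
    congr 1
    ring

-- A's loop with fuel f = k.toNat computes the closed form, for every 0 ≤ k.
lemma goA_eq_alt (f : Nat) : ∀ (n : Int), pvGoA n (f : Int) f = get_bars_sizes_alt n (f : Int) := by
  induction f with
  | zero => intro n; simp [pvGoA, get_bars_sizes_alt]
  | succ f ih =>
    intro n
    have hk : (0 : Int) < ((f : Int) + 1) := by positivity
    rw [show ((f + 1 : Nat) : Int) = (f : Int) + 1 by push_cast; ring]
    rw [alt_step n ((f : Int) + 1) hk]
    simp only [pvGoA]
    have : (f : Int) + 1 - 1 = (f : Int) := by ring
    rw [this]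
    rw [show n - -(PySem.Int.floordiv (-n) ((f : Int) + 1))
        = n + PySem.Int.floordiv (-n) ((f : Int) + 1) by ring]
    exact congrArg _ (ih _)

-- ===== VERDICT (by name: the statement is the Claim_ definition above) =====
theorem get_bars_sizes_spec : Claim_equal_get_bars_sizes := by
  intro n k _hdom hpre
  unfold Spec_get_bars_sizes get_bars_sizes
  have hk : k = (k.toNat : Int) := (Int.toNat_of_nonneg hpre).symm
  rw [hk]
  exact goA_eq_alt k.toNat n
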